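-- pv_equiv track=rewrite | github.com/drhlxiao/stix-data-center-pipeline | stix/flare_pipeline/stix_lightcurves.py | get_energy_bins
-- ===== SOURCE A (Python) =====
-- EBINS = [0, 4, 5, 6, 7, 8, 9, 10, 11, 12, 13, 14, 15, 16, 18, 20, 22, 25, 28, 32, 36, 40, 45, 50, 56, 63, 70, 76, 84, 100, 120, 150, 'Emax']
--
-- def get_energy_bins(emask):
--     ebins=[]
--     for i in range(32):
--         if emask & (1 << i) != 0:
--             ebins.append(i);
--     names=[]
--     for i in range(len(ebins) - 1):
--         begin = ebins[i]
--         end = ebins[i + 1]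
--         if end == 32:
--             names.append(f'{EBINS[begin]} keV –⁠ Emax')
--         elif end < 32:
--             names.append(f'{EBINS[begin]}  – {EBINS[end]} keV')
--         else:
--             names.append('')
--     return names
-- ===== SOURCE B (Python) =====
-- EBINS = [0, 4, 5, 6, 7, 8, 9, 10, 11, 12, 13, 14, 15, 16, 18, 20, 22, 25, 28, 32, 36, 40, 45, 50, 56, 63, 70, 76, 84, 100, 120, 150, 'Emax']
--
-- def get_energy_bins(emask):
--     # single pass: remember the previous set bit; bit indices are < 32,
--     # so the label format is always the 'begin - end keV' one.
--     names = []
--     prev = None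
--     for i in range(32):
--         if emask & (1 << i) != 0:
--             if prev is not None:
--                 names.append(f'{EBINS[prev]}  \u2013 {EBINS[i]} keV')
--             prev = i
--     return names
-- ===== Notes on version B (the rewrite author's own statement) =====
-- stated objective: simpler
-- what changed: Fuses A's two passes (collect set-bit indices, then loop over index pairs with three format branches) into one pass over range(32) that keeps the previous set bit and emits a label per adjacent pair; the dead end==32/else branches are dropped since bit indices never reach 32.
import Mathlib
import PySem

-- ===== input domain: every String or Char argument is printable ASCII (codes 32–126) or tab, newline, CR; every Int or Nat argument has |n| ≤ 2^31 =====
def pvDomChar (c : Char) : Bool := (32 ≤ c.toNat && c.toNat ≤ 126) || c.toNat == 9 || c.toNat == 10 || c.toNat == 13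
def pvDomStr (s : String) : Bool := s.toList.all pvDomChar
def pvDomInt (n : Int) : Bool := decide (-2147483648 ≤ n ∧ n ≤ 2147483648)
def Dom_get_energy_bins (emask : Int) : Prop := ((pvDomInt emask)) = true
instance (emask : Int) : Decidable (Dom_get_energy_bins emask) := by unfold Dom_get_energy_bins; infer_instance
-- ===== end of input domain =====

-- B fuses A's two passes into one loop over range(32) keeping the previous set bit;
-- the proof shows A's dead end==32/else branches never fire. Same cost, simpler shape.

-- Python's '1 << i' (i from range(32), so i ≥ 0)
def pvBit (i : Int) : Int := (1 : Int) <<< i.toNat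

-- EBINS rendered as the strings the f-string produces (str() of each element)
def pvEBINS : List String :=
  ["0","4","5","6","7","8","9","10","11","12","13","14","15","16","18","20","22","25","28",
   "32","36","40","45","50","56","63","70","76","84","100","120","150","Emax"]

-- ===== PORT A =====
-- indices handed to EBINS/ebins are always in range (bits 0..31, pairs of collected
-- indices), so the pyGetD default is never used; i ≥ 0 on range(32), so 1 << i is 1 <<< i.toNat.
def get_energy_bins (emask : Int) : List String :=
  let ebins : List Int :=
    (PySem.List.pyRange 0 32 1).foldl
      (fun acc i => if PySem.Int.band emask (pvBit i) ≠ 0 then acc ++ [i] else acc) []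
  (PySem.List.pyRange 0 ((ebins.length : Int) - 1) 1).foldl
    (fun names i =>
      let b := PySem.List.pyGetD ebins i 0
      let e := PySem.List.pyGetD ebins (i + 1) 0
      if e = 32 then
        names ++ [PySem.List.pyGetD pvEBINS b "" ++ " keV \u2013\u2060 Emax"]
      else if e < 32 then
        names ++ [PySem.List.pyGetD pvEBINS b "" ++ "  \u2013 " ++ PySem.List.pyGetD pvEBINS e "" ++ " keV"]
      else
        names ++ [""]) []

-- ===== PORT B =====
def pvLabel (p i : Int) : String :=
  PySem.List.pyGetD pvEBINS p "" ++ "  \u2013 " ++ PySem.List.pyGetD pvEBINS i "" ++ " keV"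

def get_energy_bins_alt (emask : Int) : List String :=
  ((PySem.List.pyRange 0 32 1).foldl
    (fun (st : List String × Option Int) i =>
      if PySem.Int.band emask (pvBit i) ≠ 0 then
        ((match st.2 with
          | some p => st.1 ++ [pvLabel p i]
          | none => st.1), some i)
      else st) ([], none)).1

-- ===== PRECONDITION & SPEC =====
def Spec_get_energy_bins (emask : Int) (out : List String) : Prop := out = get_energy_bins_alt emask
instance (emask : Int) (out : List String) : Decidable (Spec_get_energy_bins emask out) := by unfold Spec_get_energy_bins; infer_instance

-- ===== CLAIM (what is proved, stated in full; the proofs are below) =====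
def Claim_equal_get_energy_bins : Prop := ∀ (emask : Int), Dom_get_energy_bins emask → Spec_get_energy_bins emask (get_energy_bins emask)

-- ===== LEMMAS AND PROOFS =====

-- labels of the adjacent pairs of a list
def pvPairLabels (eb : List Int) : List String :=
  (eb.zip eb.tail).map (fun be => pvLabel be.1 be.2)

theorem pvZipTail_append_singleton (eb : List Int) (i : Int) :
    (eb ++ [i]).zip (eb ++ [i]).tail
      = eb.zip eb.tail ++ (match eb.getLast? with | none => [] | some p => [(p, i)]) := by
  induction eb with
  | nil => simp
  | cons x t ih =>
    cases t with
    | nil => simp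
    | cons y r =>
      simp only [List.cons_append, List.tail_cons, List.zip_cons_cons] at ih ⊢
      rw [List.getLast?_cons_cons, ih]

theorem pvPairLabels_append_singleton (eb : List Int) (i : Int) :
    pvPairLabels (eb ++ [i])
      = pvPairLabels eb ++ (match eb.getLast? with | none => [] | some p => [pvLabel p i]) := by
  unfold pvPairLabels
  rw [pvZipTail_append_singleton]
  cases h : eb.getLast? <;> simp

-- invariant of B's single pass
theorem pvBfold (q : Int → Bool) (l : List Int) :
    ∀ (s0 : List String) (eb : List Int),
      (l.foldl
        (fun (st : List String × Option Int) i =>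
          if q i then
            ((match st.2 with
              | some p => st.1 ++ [pvLabel p i]
              | none => st.1), some i)
          else st) (s0 ++ pvPairLabels eb, eb.getLast?))
      = (s0 ++ pvPairLabels (eb ++ l.filter q), (eb ++ l.filter q).getLast?) := by
  induction l with
  | nil => intro s0 eb; simp
  | cons i l ih =>
    intro s0 eb
    by_cases hq : q i
    · simp only [List.foldl_cons, hq, if_pos]
      have h1 : (s0 ++ pvPairLabels eb) ++
          (match eb.getLast? with | none => [] | some p => [pvLabel p i])
          = s0 ++ pvPairLabels (eb ++ [i]) := by
        rw [pvPairLabels_append_singleton]; cases eb.getLast? <;> simp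
      have h2 : (match eb.getLast? with
            | some p => (s0 ++ pvPairLabels eb) ++ [pvLabel p i]
            | none => s0 ++ pvPairLabels eb)
          = s0 ++ pvPairLabels (eb ++ [i]) := by
        cases h : eb.getLast? <;> simpa [h] using h1
      have h3 : some i = (eb ++ [i]).getLast? := by simp
      rw [h2, h3, ih s0 (eb ++ [i])]
      simp [hq]
    · simp only [List.foldl_cons, hq, if_neg, Bool.false_eq_true, not_false_iff]
      rw [ih s0 eb]
      simp [hq]

-- A's second loop, rewritten as a fold over the adjacent pairs
theorem pvIdxPairs (eb : List Int) (g : List String → Int → Int → List String) (acc : List String) :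
    (PySem.List.pyRange 0 ((eb.length : Int) - 1) 1).foldl
      (fun ns i => g ns (PySem.List.pyGetD eb i 0) (PySem.List.pyGetD eb (i + 1) 0)) acc
    = (eb.zip eb.tail).foldl (fun ns be => g ns be.1 be.2) acc := by
  cases eb with
  | nil => simp [PySem.List.pyRange]
  | cons x t =>
    have hlen : ((x :: t).length : Int) - 1 = (((x :: t).zip t).length : Int) := by
      simp [List.length_zip]
    rw [hlen]
    have hcongr : ∀ i ∈ PySem.List.pyRange 0 (((x :: t).zip t).length : Int) 1, ∀ (ns : List String),
        g ns (PySem.List.pyGetD (x :: t) i 0) (PySem.List.pyGetD (x :: t) (i + 1) 0)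
        = g ns (PySem.List.pyGetD ((x :: t).zip t) i (0, 0)).1 (PySem.List.pyGetD ((x :: t).zip t) i (0, 0)).2 := by
      intro i hi ns
      rw [PySem.List.mem_pyRange_one] at hi
      have hzl : ((x :: t).zip t).length = t.length := by
        simp [List.length_zip]
      have hi2 : i < (t.length : Int) := by
        have h := hi.2; rwa [hzl] at h
      rw [PySem.List.pyGetD_eq_getElem (x :: t) 0 hi.1 (by simp; omega),
          PySem.List.pyGetD_eq_getElem (x :: t) 0 (by omega) (by simp; omega),
          PySem.List.pyGetD_eq_getElem ((x :: t).zip t) (0, 0) hi.1 (by rw [hzl]; exact_mod_cast hi2)]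
      have h1 : (i + 1).toNat = i.toNat + 1 := by omega
      simp [List.getElem_zip, h1]
    rw [PySem.List.foldl_congr_mem' (h := hcongr)]
    exact PySem.List.foldl_pyRange_zero_pyGetD' ((x :: t).zip t) (0, 0)
      (fun ns be => g ns be.1 be.2) acc

-- ===== VERDICT (by name: the statement is the Claim_ definition above) =====
theorem get_energy_bins_spec : Claim_equal_get_energy_bins := by
  intro emask _
  unfold Spec_get_energy_bins get_energy_bins get_energy_bins_alt
  -- A's first loop collects the set bits
  rw [PySem.List.foldl_append_ite_eq_filter
        (fun i => PySem.Int.band emask (pvBit i) ≠ 0) (PySem.List.pyRange 0 32 1) []]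
  simp only [List.nil_append]
  set eb : List Int :=
    (PySem.List.pyRange 0 32 1).filter
      (fun i => decide (PySem.Int.band emask (pvBit i) ≠ 0)) with hebdef
  have hbound : ∀ x ∈ eb, 0 ≤ x ∧ x < 32 := by
    intro x hx
    have hm := List.mem_of_mem_filter hx
    rw [PySem.List.mem_pyRange_one] at hm
    exact hm
  -- B's single pass
  have hB := pvBfold (fun i => decide (PySem.Int.band emask (pvBit i) ≠ 0))
      (PySem.List.pyRange 0 32 1) [] []
  simp only [decide_eq_true_eq, pvPairLabels, List.tail_nil, List.zip_nil_left, List.map_nil,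
    List.nil_append, List.getLast?_nil] at hB
  rw [hB]
  -- A's second loop over index pairs
  rw [pvIdxPairs eb (fun ns b e =>
      if e = 32 then ns ++ [PySem.List.pyGetD pvEBINS b "" ++ " keV \u2013\u2060 Emax"]
      else if e < 32 then ns ++ [PySem.List.pyGetD pvEBINS b "" ++ "  \u2013 " ++ PySem.List.pyGetD pvEBINS e "" ++ " keV"]
      else ns ++ [""]) []]
  have hcongr : ∀ be ∈ eb.zip eb.tail, ∀ ns : List String,
      (if be.2 = 32 then ns ++ [PySem.List.pyGetD pvEBINS be.1 "" ++ " keV \u2013\u2060 Emax"]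
       else if be.2 < 32 then ns ++ [PySem.List.pyGetD pvEBINS be.1 "" ++ "  \u2013 " ++ PySem.List.pyGetD pvEBINS be.2 "" ++ " keV"]
       else ns ++ [""])
      = ns ++ [pvLabel be.1 be.2] := by
    intro be hbe ns
    have h2' : be.2 ∈ eb := List.mem_of_mem_tail (List.of_mem_zip hbe).2
    have hb2 := hbound _ h2'
    rw [if_neg (by omega), if_pos (by omega)]
    rfl
  rw [PySem.List.foldl_congr_mem' (h := fun x hx acc => hcongr x hx acc)]
  rw [PySem.List.foldl_append_singleton_eq_map]
  have hfe : (fun i : Int => decide (PySem.Int.band emask (pvBit i) ≠ 0))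
      = fun i : Int => !decide (PySem.Int.band emask (pvBit i) = 0) := by
    funext i; by_cases h : PySem.Int.band emask (pvBit i) = 0 <;> simp [h]
  simp [hebdef]
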